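-- pv_equiv track=rewrite | github.com/maijapersson/applied_bioinformatics | HMMlearn/hmm.py | convert_state
-- ===== SOURCE A (Python) =====
-- def convert_state(hmm_output):
--     hmm_output[0] = hmm_output[1]
--     hmm_output[-1] = hmm_output[-2]
--     changes = [0]
--     for i in range(len(hmm_output)-1):
--         if hmm_output[i] != hmm_output[i+1]:
--             changes.append(i)   # stop of this state
--             changes.append(i+1) # start of next state
--     changes.append(len(hmm_output)-1)
--     if changes[1] == changes[0]:
--         changes.pop(0)
--     if changes[-1] == changes[-2]:
--         changes.pop()
--     return changes
-- ===== SOURCE B (Python) =====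
-- def convert_state(hmm_output):
--     # Run-based rewrite: find maximal runs of equal states and emit each run's
--     # (start, stop) pair.  The two endpoint mutations are kept (same in-place
--     # side effect as the original); because of them the original's two trim
--     # checks can never fire, so they are dropped.
--     hmm_output[0] = hmm_output[1]
--     hmm_output[-1] = hmm_output[-2]
--     n = len(hmm_output)
--     changes = []
--     start = 0
--     while start < n:
--         stop = start
--         while stop + 1 < n and hmm_output[stop + 1] == hmm_output[start]:
--             stop += 1
--         changes.append(start)
--         changes.append(stop)
--         start = stop + 1
--     return changes
-- ===== Notes on version B (the rewrite author's own statement) =====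
-- stated objective: alternative
-- what changed: Replaces the adjacent-pair boundary scan with post-hoc endpoint trims by a run-detection loop that walks maximal runs of equal states and emits each run's (start, stop) pair directly, dropping the two trim checks (which can never fire after the endpoint mutations).
import Mathlib
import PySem

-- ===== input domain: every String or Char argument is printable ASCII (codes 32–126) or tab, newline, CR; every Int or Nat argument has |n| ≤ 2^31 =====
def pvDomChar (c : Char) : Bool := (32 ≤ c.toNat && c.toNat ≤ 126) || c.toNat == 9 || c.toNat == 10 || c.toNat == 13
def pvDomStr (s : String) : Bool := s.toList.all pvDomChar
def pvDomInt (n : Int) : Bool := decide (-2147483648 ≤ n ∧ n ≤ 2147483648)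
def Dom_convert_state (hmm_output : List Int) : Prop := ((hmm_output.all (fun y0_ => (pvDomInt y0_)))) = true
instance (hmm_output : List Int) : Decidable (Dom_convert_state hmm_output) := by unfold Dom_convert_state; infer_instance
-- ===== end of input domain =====

-- B replaces A's adjacent-pair boundary scan (plus two post-hoc trim checks) by a run-detection
-- loop emitting each run's (start, stop) pair; the equivalence proved is about the RETURN value
-- (both Pythons perform the same two in-place endpoint mutations on the argument).

-- ===== PORT A =====
def convert_state (hmm_output : List Int) : List Int :=
  match PySem.List.pyGet? hmm_output 1 with
  | none => []
  | some v1 =>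
    let h1 := hmm_output.set 0 v1
    match PySem.List.pyGet? h1 (-2) with
    | none => []
    | some v2 =>
      let h := h1.set (h1.length - 1) v2
      let n : Int := PySem.List.len h
      let changes : List Int := (PySem.List.pyRange 0 (n - 1) 1).foldl
        (fun acc i =>
          if PySem.List.pyGetD h i 0 ≠ PySem.List.pyGetD h (i + 1) 0
          then acc ++ [i, i + 1] else acc) [0]
      let changes := changes ++ [n - 1]
      let changes := if PySem.List.pyGet? changes 1 = PySem.List.pyGet? changes 0
                     then changes.drop 1 else changes
      if PySem.List.pyGet? changes (-1) = PySem.List.pyGet? changes (-2)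
      then changes.dropLast else changes

-- ===== PORT B =====
-- inner while: advance stop while hmm_output[stop + 1] == hmm_output[start]
def runStop (h : List Int) (n start stop : Int) : Int :=
  if stop + 1 < n ∧ PySem.List.pyGetD h (stop + 1) 0 = PySem.List.pyGetD h start 0
  then runStop h n start (stop + 1)
  else stop
termination_by (n - stop).toNat
decreasing_by omega

-- runStop never moves stop backwards (cited by runsLoop's decreasing_by)
theorem le_runStop (h : List Int) (n start stop : Int) : stop ≤ runStop h n start stop := by
  unfold runStop
  split
  · have := le_runStop h n start (stop + 1); omega
  · omega
termination_by (n - stop).toNat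
decreasing_by omega

-- outer while: one iteration per maximal run, appending [start, stop]
def runsLoop (h : List Int) (n start : Int) : List Int :=
  if start < n then
    let stop := runStop h n start start
    start :: stop :: runsLoop h n (stop + 1)
  else []
termination_by (n - start).toNat
decreasing_by have := le_runStop h n start start; omega

def convert_state_alt (hmm_output : List Int) : List Int :=
  match PySem.List.pyGet? hmm_output 1 with
  | none => []
  | some v1 =>
    let h1 := hmm_output.set 0 v1
    match PySem.List.pyGet? h1 (-2) with
    | none => []
    | some v2 =>
      let h := h1.set (h1.length - 1) v2
      runsLoop h (PySem.List.len h) 0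

-- ===== PRECONDITION & SPEC =====
-- Pre_ excludes exactly the inputs of length < 2, on which the Python A raises IndexError.
def Pre_convert_state (hmm_output : List Int) : Prop := 2 ≤ hmm_output.length
instance (hmm_output : List Int) : Decidable (Pre_convert_state hmm_output) := by
  unfold Pre_convert_state; infer_instance
def pvWitness_convert_state : List Int := [1, 1, 2, 2, 2, 1]
def Spec_convert_state (hmm_output : List Int) (out : List Int) : Prop := out = convert_state_alt hmm_output
instance (hmm_output : List Int) (out : List Int) : Decidable (Spec_convert_state hmm_output out) := by
  unfold Spec_convert_state; infer_instance

-- ===== CLAIM (what is proved, stated in full; the proofs are below) =====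
def Claim_equal_convert_state : Prop := ∀ (hmm_output : List Int), Dom_convert_state hmm_output → Pre_convert_state hmm_output → Spec_convert_state hmm_output (convert_state hmm_output)

-- ===== LEMMAS AND PROOFS =====

-- every element of the run found by runStop equals the run's start element
theorem runStop_run (h : List Int) (n start stop i : Int) (h1 : stop < i)
    (h2 : i ≤ runStop h n start stop) :
    PySem.List.pyGetD h i 0 = PySem.List.pyGetD h start 0 := by
  rw [runStop] at h2
  split at h2
  · rename_i hc
    by_cases hi : i = stop + 1
    · subst hi; exact hc.2
    · exact runStop_run h n start (stop + 1) i (by omega) h2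
  · omega
termination_by (n - stop).toNat
decreasing_by omega

theorem runStop_lt (h : List Int) (n start stop : Int) (hst : stop < n) :
    runStop h n start stop < n := by
  unfold runStop
  split
  · exact runStop_lt h n start (stop + 1) (by omega)
  · exact hst
termination_by (n - stop).toNat
decreasing_by omega

-- the while-loop exit condition holds at runStop's result
theorem runStop_fix (h : List Int) (n start stop : Int) :
    ¬(runStop h n start stop + 1 < n ∧
      PySem.List.pyGetD h (runStop h n start stop + 1) 0 = PySem.List.pyGetD h start 0) := by
  unfold runStop
  split
  · exact runStop_fix h n start (stop + 1)
  · assumption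
termination_by (n - stop).toNat
decreasing_by omega

-- core identity: A's boundary list over [s, n-1) bracketed by s and n-1 is B's run list from s
theorem runs_eq (h : List Int) (n : Int) (s : Int) (h0 : 0 ≤ s) (hs : s < n) :
    ([s] ++ (PySem.List.pyRange s (n - 1) 1).flatMap
        (fun i => if PySem.List.pyGetD h i 0 ≠ PySem.List.pyGetD h (i + 1) 0
                  then [i, i + 1] else []) ++ [n - 1])
    = runsLoop h n s := by
  have hts : s ≤ runStop h n s s := le_runStop h n s s
  have htn : runStop h n s s < n := runStop_lt h n s s hs
  have hfix := runStop_fix h n s s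
  set t := runStop h n s s with ht
  have hgt : PySem.List.pyGetD h t 0 = PySem.List.pyGetD h s 0 := by
    by_cases hts' : t = s
    · rw [hts']
    · exact runStop_run h n s s t (by omega) (by omega)
  have hmid0 : (PySem.List.pyRange s t 1).flatMap
      (fun i => if PySem.List.pyGetD h i 0 ≠ PySem.List.pyGetD h (i + 1) 0
                then [i, i + 1] else []) = [] := by
    rw [List.flatMap_eq_nil_iff]
    intro i hi
    rw [PySem.List.mem_pyRange_one] at hi
    have e1 : PySem.List.pyGetD h i 0 = PySem.List.pyGetD h s 0 := by
      by_cases hi' : i = s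
      · rw [hi']
      · exact runStop_run h n s s i (by omega) (by omega)
    have e2 : PySem.List.pyGetD h (i + 1) 0 = PySem.List.pyGetD h s 0 :=
      runStop_run h n s s (i + 1) (by omega) (by omega)
    simp [e1, e2]
  rw [runsLoop]
  simp only [hs, if_true]
  rw [← ht]
  by_cases hc : t + 1 < n
  · have hbound : PySem.List.pyGetD h t 0 ≠ PySem.List.pyGetD h (t + 1) 0 := by
      intro he
      exact hfix ⟨hc, by rw [← he, hgt]⟩
    have hsplit : PySem.List.pyRange s (n - 1) 1
        = PySem.List.pyRange s t 1 ++ PySem.List.pyRange t (n - 1) 1 :=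
      PySem.List.pyRange_one_append s t (n - 1) hts (by omega)
    have hcons : PySem.List.pyRange t (n - 1) 1 = t :: PySem.List.pyRange (t + 1) (n - 1) 1 :=
      PySem.List.pyRange_one_cons (by omega)
    have IH := runs_eq h n (t + 1) (by omega) hc
    rw [hsplit, List.flatMap_append, hmid0, hcons, List.flatMap_cons, if_pos hbound, ← IH]
    simp
  · have ht1 : t = n - 1 := by omega
    have hrange : PySem.List.pyRange s (n - 1) 1 = PySem.List.pyRange s t 1 := by rw [ht1]
    rw [hrange, hmid0, runsLoop]
    simp only [show ¬ (t + 1 < n) from hc, if_false]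
    rw [ht1]; simp
termination_by (n - s).toNat
decreasing_by omega

-- with equal endpoint pairs, every boundary index A records lies strictly between 0 and n-1
theorem mid_mem (h : List Int) (n : Int)
    (h01 : PySem.List.pyGetD h 0 0 = PySem.List.pyGetD h 1 0)
    (hend : PySem.List.pyGetD h (n - 2) 0 = PySem.List.pyGetD h (n - 1) 0)
    (x : Int)
    (hx : x ∈ (PySem.List.pyRange 0 (n - 1) 1).flatMap
        (fun i => if PySem.List.pyGetD h i 0 ≠ PySem.List.pyGetD h (i + 1) 0
                  then [i, i + 1] else [])) :
    0 < x ∧ x < n - 1 := by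
  rw [List.mem_flatMap] at hx
  obtain ⟨i, hi, hxi⟩ := hx
  rw [PySem.List.mem_pyRange_one] at hi
  by_cases hc : PySem.List.pyGetD h i 0 ≠ PySem.List.pyGetD h (i + 1) 0
  · simp only [if_pos hc] at hxi
    have hi0 : i ≠ 0 := by
      intro e; rw [e] at hc; exact hc (by simpa using h01)
    have hin2 : i ≠ n - 2 := by
      intro e; rw [e] at hc
      exact hc (by rw [show n - 2 + 1 = n - 1 by ring]; exact hend)
    simp at hxi
    omega
  · simp [if_neg hc] at hxi

-- hence A's first trim (changes.pop(0)) never fires …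
theorem trim1 (mid : List Int) (n1 : Int) (hn : n1 ≠ 0) (hm : ∀ x ∈ mid, x ≠ 0) :
    PySem.List.pyGet? ((0 :: mid) ++ [n1]) 1 ≠ PySem.List.pyGet? ((0 :: mid) ++ [n1]) 0 := by
  simp only [List.cons_append]
  rw [PySem.List.pyGet?_zero_cons, show ((1:Int)) = ((0:Nat):Int) + 1 by norm_num,
    PySem.List.pyGet?_cons_succ, PySem.List.pyGet?_natCast]
  cases mid with
  | nil => simp [hn]
  | cons m ms =>
      simp only [List.cons_append, List.getElem?_cons_zero]
      simp only [ne_eq, Option.some.injEq]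
      exact hm m (by simp)

-- … and neither does the second (changes.pop())
theorem trim2 (mid : List Int) (n1 : Int) (hn : n1 ≠ 0) (hm : ∀ x ∈ mid, x ≠ n1) :
    PySem.List.pyGet? ((0 :: mid) ++ [n1]) (-1) ≠ PySem.List.pyGet? ((0 :: mid) ++ [n1]) (-2) := by
  simp only [List.cons_append]
  rw [PySem.List.pyGet?_neg_one,
    PySem.List.pyGet?_neg_ofNat _ 2 (by norm_num) (by simp)]
  rw [show (0 :: (mid ++ [n1])) = (0 :: mid) ++ [n1] by simp]
  rw [List.getLast?_concat]
  have hidx : ((0 :: mid) ++ [n1]).length - 2 = mid.length := by simp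
  rw [hidx, List.getElem?_append_left (by simp : mid.length < (0 :: mid).length),
    List.getElem?_eq_getElem (by simp)]
  intro he
  have hx : (0 :: mid)[mid.length] = n1 := by
    exact (Option.some.injEq _ _).mp he.symm
  rcases List.mem_cons.mp (List.getElem_mem _) with h0 | hmem
  · rw [hx] at h0; exact hn h0
  · rw [hx] at hmem; exact hm n1 hmem rfl

-- A's post-mutation computation equals B's run loop, for any list with equal endpoint pairs
theorem final (h : List Int) (hl2 : 2 ≤ h.length)
    (h01 : PySem.List.pyGetD h 0 0 = PySem.List.pyGetD h 1 0)
    (hend : PySem.List.pyGetD h ((h.length : Int) - 2) 0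
          = PySem.List.pyGetD h ((h.length : Int) - 1) 0) :
    (let n : Int := PySem.List.len h
     let changes : List Int := (PySem.List.pyRange 0 (n - 1) 1).foldl
        (fun acc i =>
          if PySem.List.pyGetD h i 0 ≠ PySem.List.pyGetD h (i + 1) 0
          then acc ++ [i, i + 1] else acc) [0]
     let changes := changes ++ [n - 1]
     let changes := if PySem.List.pyGet? changes 1 = PySem.List.pyGet? changes 0
                    then changes.drop 1 else changes
     if PySem.List.pyGet? changes (-1) = PySem.List.pyGet? changes (-2)
     then changes.dropLast else changes)
    = runsLoop h (PySem.List.len h) 0 := by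
  simp only [PySem.List.len_eq]
  have hb : (fun (acc : List Int) i =>
      if PySem.List.pyGetD h i 0 ≠ PySem.List.pyGetD h (i + 1) 0
      then acc ++ [i, i + 1] else acc)
      = (fun (acc : List Int) i => acc ++
          (if PySem.List.pyGetD h i 0 ≠ PySem.List.pyGetD h (i + 1) 0
           then [i, i + 1] else [])) := by
    funext acc i; split <;> simp
  rw [hb, PySem.List.foldl_append_eq_flatMap]
  set mid := (PySem.List.pyRange 0 ((h.length : Int) - 1) 1).flatMap
      (fun i => if PySem.List.pyGetD h i 0 ≠ PySem.List.pyGetD h (i + 1) 0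
                then [i, i + 1] else []) with hmid
  have hmm : ∀ x ∈ mid, 0 < x ∧ x < (h.length : Int) - 1 := by
    intro x hx
    exact mid_mem h (h.length : Int) h01 hend x (by rw [hmid] at hx; exact hx)
  have hn0 : ((h.length : Int) - 1) ≠ 0 := by omega
  simp only [List.singleton_append]
  have t1 := trim1 mid ((h.length : Int) - 1) hn0 (fun x hx => by have := hmm x hx; omega)
  have t2 := trim2 mid ((h.length : Int) - 1) hn0 (fun x hx => by have := hmm x hx; omega)
  have key := runs_eq h (h.length : Int) 0 le_rfl (by omega)
  rw [if_neg t1]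
  rw [if_neg t2]
  rw [← key, hmid]
  simp

-- the two endpoint mutations make the first two and the last two elements equal
theorem endpoints (xs : List Int) (hL : 2 ≤ xs.length) :
    PySem.List.pyGetD ((xs.set 0 (xs[1]'(by omega))).set ((xs.set 0 (xs[1]'(by omega))).length - 1)
        ((xs.set 0 (xs[1]'(by omega)))[xs.length - 2]'(by simp; omega))) 0 0
      = PySem.List.pyGetD ((xs.set 0 (xs[1]'(by omega))).set ((xs.set 0 (xs[1]'(by omega))).length - 1)
        ((xs.set 0 (xs[1]'(by omega)))[xs.length - 2]'(by simp; omega))) 1 0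
    ∧ PySem.List.pyGetD ((xs.set 0 (xs[1]'(by omega))).set ((xs.set 0 (xs[1]'(by omega))).length - 1)
        ((xs.set 0 (xs[1]'(by omega)))[xs.length - 2]'(by simp; omega))) ((xs.length : Int) - 2) 0
      = PySem.List.pyGetD ((xs.set 0 (xs[1]'(by omega))).set ((xs.set 0 (xs[1]'(by omega))).length - 1)
        ((xs.set 0 (xs[1]'(by omega)))[xs.length - 2]'(by simp; omega))) ((xs.length : Int) - 1) 0 := by
  have hL1 : ((xs.set 0 (xs[1]'(by omega))).set ((xs.set 0 (xs[1]'(by omega))).length - 1)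
      ((xs.set 0 (xs[1]'(by omega)))[xs.length - 2]'(by simp; omega))).length = xs.length := by simp
  have b0 : (0:Int) < (xs.length : Int) := by omega
  have b1 : (1:Int) < (xs.length : Int) := by omega
  have bn2l : (0:Int) ≤ (xs.length : Int) - 2 := by omega
  have bn2r : (xs.length : Int) - 2 < (xs.length : Int) := by omega
  have bn1l : (0:Int) ≤ (xs.length : Int) - 1 := by omega
  have bn1r : (xs.length : Int) - 1 < (xs.length : Int) := by omega
  rw [PySem.List.pyGetD_eq_getElem _ _ (by norm_num) (by rw [hL1]; exact b0),
      PySem.List.pyGetD_eq_getElem _ _ (by norm_num) (by rw [hL1]; exact b1),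
      PySem.List.pyGetD_eq_getElem _ _ (by exact bn2l) (by rw [hL1]; exact bn2r),
      PySem.List.pyGetD_eq_getElem _ _ (by exact bn1l) (by rw [hL1]; exact bn1r)]
  have tn2 : ((xs.length : Int) - 2).toNat = xs.length - 2 := by omega
  have tn1 : ((xs.length : Int) - 1).toNat = xs.length - 1 := by omega
  simp only [Int.toNat_zero, Int.toNat_one, tn2, tn1, List.getElem_set, List.length_set]
  constructor
  · split_ifs <;> first | rfl | omega
  · split_ifs <;> rfl

theorem main (xs : List Int) (hL : 2 ≤ xs.length) :
    convert_state xs = convert_state_alt xs := by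
  have h1lt : (1:Nat) < xs.length := by omega
  have hget1 : PySem.List.pyGet? xs 1 = some xs[1] := by
    rw [show ((1:Int)) = ((1:Nat):Int) by norm_num]
    exact PySem.List.pyGet?_ofNat xs 1 h1lt
  unfold convert_state convert_state_alt
  simp only [hget1]
  have hlen1 : (xs.set 0 xs[1]).length = xs.length := by simp
  have hget2 : PySem.List.pyGet? (xs.set 0 xs[1]) (-2)
      = some ((xs.set 0 xs[1])[xs.length - 2]'(by omega)) := by
    rw [PySem.List.pyGet?_neg_ofNat _ 2 (by norm_num) (by simp; omega)]
    rw [List.getElem?_eq_getElem (by omega)]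
    simp [hlen1]
  simp only [hget2]
  have hl2 : 2 ≤ ((xs.set 0 xs[1]).set ((xs.set 0 xs[1]).length - 1)
      (xs.set 0 xs[1])[xs.length - 2]).length := by simp; omega
  obtain ⟨h01, hend⟩ := endpoints xs hL
  exact final _ hl2 h01 (by rw [show ((((xs.set 0 xs[1]).set ((xs.set 0 xs[1]).length - 1)
      (xs.set 0 xs[1])[xs.length - 2]).length : Int)) = (xs.length : Int) by simp]; exact hend)

-- ===== VERDICT (by name: the statement is the Claim_ definition above) =====
theorem convert_state_spec : Claim_equal_convert_state := by
  intro xs _ hpre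
  exact main xs hpre
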